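-- pv_equiv track=rewrite | github.com/php-workx/skill-codereview | skills/codereview/scripts/lifecycle.py | compute_lifecycle_summary
-- ===== SOURCE A (Python) =====
-- def compute_lifecycle_summary(
--     active: list, suppressed: list, deferred_resurfaced: int
-- ) -> dict:
--     """Compute lifecycle summary counts."""
--     summary = {
--         "new": 0,
--         "recurring": 0,
--         "rejected": 0,
--         "deferred": 0,
--         "deferred_resurfaced": deferred_resurfaced,
--     }
--     for f in active:
--         status = f.get("lifecycle_status", "new")
--         if status in summary:
--             summary[status] += 1
--     for f in suppressed:
--         status = f.get("lifecycle_status", "rejected")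
--         if status in summary:
--             summary[status] += 1
--     return summary
-- ===== SOURCE B (Python) =====
-- def compute_lifecycle_summary(
--     active: list, suppressed: list, deferred_resurfaced: int
-- ) -> dict:
--     """Compute lifecycle summary counts."""
--     summary = {
--         "new": 0,
--         "recurring": 0,
--         "rejected": 0,
--         "deferred": 0,
--         "deferred_resurfaced": deferred_resurfaced,
--     }
--     statuses = sorted(
--         [f.get("lifecycle_status", "new") for f in active]
--         + [f.get("lifecycle_status", "rejected") for f in suppressed]
--     )
--     i, n = 0, len(statuses)
--     while i < n:
--         j = i + 1
--         while j < n and statuses[j] == statuses[i]: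
--             j += 1
--         if statuses[i] in summary:
--             summary[statuses[i]] += j - i
--         i = j
--     return summary
-- ===== Notes on version B (the rewrite author's own statement) =====
-- stated objective: alternative
-- what changed: B replaces A's per-item dict increments with a sort-then-scan: it sorts the flat status list and walks it once in equal-status runs, adding each whole run length to its summary key at once.
import Mathlib
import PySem

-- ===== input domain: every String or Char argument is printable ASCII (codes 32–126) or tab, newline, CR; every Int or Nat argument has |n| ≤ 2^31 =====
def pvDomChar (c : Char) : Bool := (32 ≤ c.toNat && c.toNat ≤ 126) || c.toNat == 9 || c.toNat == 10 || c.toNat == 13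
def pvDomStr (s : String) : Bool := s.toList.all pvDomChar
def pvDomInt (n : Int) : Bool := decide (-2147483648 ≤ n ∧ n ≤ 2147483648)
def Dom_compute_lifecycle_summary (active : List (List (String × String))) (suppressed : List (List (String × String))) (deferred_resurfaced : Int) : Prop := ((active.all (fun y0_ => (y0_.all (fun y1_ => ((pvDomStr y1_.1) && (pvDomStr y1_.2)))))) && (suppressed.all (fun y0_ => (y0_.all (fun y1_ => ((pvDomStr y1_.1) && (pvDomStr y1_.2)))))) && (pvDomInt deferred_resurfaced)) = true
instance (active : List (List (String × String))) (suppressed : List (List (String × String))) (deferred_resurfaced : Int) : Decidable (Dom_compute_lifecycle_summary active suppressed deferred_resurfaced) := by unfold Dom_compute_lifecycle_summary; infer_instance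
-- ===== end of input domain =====

-- B replaces A's per-item dict increments with a sort-then-scan over equal-status runs,
-- adding each whole run length at once (objective: alternative; same return values).


-- ===== PORT A =====
def compute_lifecycle_summary (active : List (List (String × String))) (suppressed : List (List (String × String))) (deferred_resurfaced : Int) : List (String × Int) :=
  let summary : PySem.Dict String Int :=
    ((((PySem.Dict.empty.insert "new" 0).insert "recurring" 0).insert "rejected" 0).insert
        "deferred" 0).insert "deferred_resurfaced" deferred_resurfaced
  let summary := active.foldl (fun s f =>
      let status := (List.lookup "lifecycle_status" f).getD "new"
      if s.contains status then s.modify status 0 (· + 1) else s) summary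
  let summary := suppressed.foldl (fun s f =>
      let status := (List.lookup "lifecycle_status" f).getD "rejected"
      if s.contains status then s.modify status 0 (· + 1) else s) summary
  summary.items

-- ===== PORT B =====
-- the while-loop pair of Source B: consume the sorted list one maximal equal-status run at a time,
-- adding the whole run length (j - i) to that status's key when it is a summary key
def pvRunScan (summary : PySem.Dict String Int) : List String → PySem.Dict String Int
  | [] => summary
  | st :: rest =>
    let run := rest.takeWhile (· == st)
    let summary := if summary.contains st then summary.modify st 0 (· + (1 + run.length)) else summary
    pvRunScan summary (rest.dropWhile (· == st))
termination_by l => l.length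
decreasing_by
  simp only [List.length_cons]
  exact Nat.lt_succ_of_le (List.length_dropWhile_le _ _)

def compute_lifecycle_summary_alt (active : List (List (String × String))) (suppressed : List (List (String × String))) (deferred_resurfaced : Int) : List (String × Int) :=
  let summary : PySem.Dict String Int :=
    PySem.Dict.mk [("new", 0), ("recurring", 0), ("rejected", 0), ("deferred", 0),
                   ("deferred_resurfaced", deferred_resurfaced)]
  let statuses := PySem.List.sorted
    (active.map (fun f => (List.lookup "lifecycle_status" f).getD "new") ++
     suppressed.map (fun f => (List.lookup "lifecycle_status" f).getD "rejected"))
    (fun x => x) false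
  (pvRunScan summary statuses).items

-- ===== PRECONDITION & SPEC =====
def Spec_compute_lifecycle_summary (active : List (List (String × String))) (suppressed : List (List (String × String))) (deferred_resurfaced : Int) (out : List (String × Int)) : Prop := out = compute_lifecycle_summary_alt active suppressed deferred_resurfaced
instance (active : List (List (String × String))) (suppressed : List (List (String × String))) (deferred_resurfaced : Int) (out : List (String × Int)) : Decidable (Spec_compute_lifecycle_summary active suppressed deferred_resurfaced out) := by unfold Spec_compute_lifecycle_summary; infer_instance

-- ===== CLAIM (what is proved, stated in full; the proofs are below) =====
def Claim_equal_compute_lifecycle_summary : Prop := ∀ (active : List (List (String × String))) (suppressed : List (List (String × String))) (deferred_resurfaced : Int), Dom_compute_lifecycle_summary active suppressed deferred_resurfaced → Spec_compute_lifecycle_summary active suppressed deferred_resurfaced (compute_lifecycle_summary active suppressed deferred_resurfaced)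

-- ===== LEMMAS AND PROOFS =====

-- the five-key dict both programs maintain
def pvD5 (a b c d e : Int) : PySem.Dict String Int :=
  PySem.Dict.mk [("new", a), ("recurring", b), ("rejected", c), ("deferred", d),
                 ("deferred_resurfaced", e)]

lemma pvD5_congr {a b c d e a' b' c' d' e' : Int} (h1 : a = a') (h2 : b = b') (h3 : c = c')
    (h4 : d = d') (h5 : e = e') : pvD5 a b c d e = pvD5 a' b' c' d' e' := by
  rw [h1, h2, h3, h4, h5]

lemma pvM_new (a b c d e n : Int) : (pvD5 a b c d e).modify "new" 0 (· + n) = pvD5 (a + n) b c d e := by rfl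
lemma pvM_rec (a b c d e n : Int) : (pvD5 a b c d e).modify "recurring" 0 (· + n) = pvD5 a (b + n) c d e := by rfl
lemma pvM_rej (a b c d e n : Int) : (pvD5 a b c d e).modify "rejected" 0 (· + n) = pvD5 a b (c + n) d e := by rfl
lemma pvM_def (a b c d e n : Int) : (pvD5 a b c d e).modify "deferred" 0 (· + n) = pvD5 a b c (d + n) e := by rfl
lemma pvM_dr (a b c d e n : Int) : (pvD5 a b c d e).modify "deferred_resurfaced" 0 (· + n) = pvD5 a b c d (e + n) := by rfl

lemma pvC5 (a b c d e : Int) (st : String) : (pvD5 a b c d e).contains st =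
      (st == "new" || (st == "recurring" || (st == "rejected" || (st == "deferred" ||
       st == "deferred_resurfaced")))) := by
  simp [pvD5, PySem.Dict.contains, BEq.comm]

-- a single conditional bump by n, case-split over the five keys
lemma pvBump_D5 (a b c d e n : Int) (st : String) :
    (if (pvD5 a b c d e).contains st then (pvD5 a b c d e).modify st 0 (· + n)
     else pvD5 a b c d e) =
      if st = "new" then pvD5 (a + n) b c d e
      else if st = "recurring" then pvD5 a (b + n) c d e
      else if st = "rejected" then pvD5 a b (c + n) d e
      else if st = "deferred" then pvD5 a b c (d + n) e
      else if st = "deferred_resurfaced" then pvD5 a b c d (e + n)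
      else pvD5 a b c d e := by
  by_cases h1 : st = "new"
  · subst h1; rw [if_pos rfl, if_pos (by rw [pvC5]; rfl), pvM_new]
  rw [if_neg h1]
  by_cases h2 : st = "recurring"
  · subst h2; rw [if_pos rfl, if_pos (by rw [pvC5]; rfl), pvM_rec]
  rw [if_neg h2]
  by_cases h3 : st = "rejected"
  · subst h3; rw [if_pos rfl, if_pos (by rw [pvC5]; rfl), pvM_rej]
  rw [if_neg h3]
  by_cases h4 : st = "deferred"
  · subst h4; rw [if_pos rfl, if_pos (by rw [pvC5]; rfl), pvM_def]
  rw [if_neg h4]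
  by_cases h5 : st = "deferred_resurfaced"
  · subst h5; rw [if_pos rfl, if_pos (by rw [pvC5]; rfl), pvM_dr]
  rw [if_neg h5]
  rw [if_neg (by simp [pvC5, h1, h2, h3, h4, h5])]

-- A's per-element loop over any status list accumulates the per-key counts
lemma pvLoop_D5 (l : List String) (a b c d e : Int) :
    l.foldl (fun s st => if s.contains st then s.modify st 0 (· + 1) else s) (pvD5 a b c d e) =
      pvD5 (a + l.count "new") (b + l.count "recurring") (c + l.count "rejected")
        (d + l.count "deferred") (e + l.count "deferred_resurfaced") := by
  induction l generalizing a b c d e with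
  | nil => simp
  | cons st l ih =>
    simp only [List.foldl_cons, pvBump_D5 a b c d e 1 st]
    by_cases h1 : st = "new"
    · subst h1; rw [if_pos rfl, ih]
      apply pvD5_congr
      · rw [List.count_cons_self]; push_cast; ring
      · rw [List.count_cons_of_ne (by decide)]
      · rw [List.count_cons_of_ne (by decide)]
      · rw [List.count_cons_of_ne (by decide)]
      · rw [List.count_cons_of_ne (by decide)]
    rw [if_neg h1]
    by_cases h2 : st = "recurring"
    · subst h2; rw [if_pos rfl, ih]
      apply pvD5_congr
      · rw [List.count_cons_of_ne (by decide)]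
      · rw [List.count_cons_self]; push_cast; ring
      · rw [List.count_cons_of_ne (by decide)]
      · rw [List.count_cons_of_ne (by decide)]
      · rw [List.count_cons_of_ne (by decide)]
    rw [if_neg h2]
    by_cases h3 : st = "rejected"
    · subst h3; rw [if_pos rfl, ih]
      apply pvD5_congr
      · rw [List.count_cons_of_ne (by decide)]
      · rw [List.count_cons_of_ne (by decide)]
      · rw [List.count_cons_self]; push_cast; ring
      · rw [List.count_cons_of_ne (by decide)]
      · rw [List.count_cons_of_ne (by decide)]
    rw [if_neg h3]
    by_cases h4 : st = "deferred"
    · subst h4; rw [if_pos rfl, ih]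
      apply pvD5_congr
      · rw [List.count_cons_of_ne (by decide)]
      · rw [List.count_cons_of_ne (by decide)]
      · rw [List.count_cons_of_ne (by decide)]
      · rw [List.count_cons_self]; push_cast; ring
      · rw [List.count_cons_of_ne (by decide)]
    rw [if_neg h4]
    by_cases h5 : st = "deferred_resurfaced"
    · subst h5; rw [if_pos rfl, ih]
      apply pvD5_congr
      · rw [List.count_cons_of_ne (by decide)]
      · rw [List.count_cons_of_ne (by decide)]
      · rw [List.count_cons_of_ne (by decide)]
      · rw [List.count_cons_of_ne (by decide)]
      · rw [List.count_cons_self]; push_cast; ring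
    rw [if_neg h5, ih]
    apply pvD5_congr
    · rw [List.count_cons_of_ne h1]
    · rw [List.count_cons_of_ne h2]
    · rw [List.count_cons_of_ne h3]
    · rw [List.count_cons_of_ne h4]
    · rw [List.count_cons_of_ne h5]

-- B's run-scan over ANY status list accumulates the same per-key counts: each maximal
-- run contributes its full length to its key, and a key's run lengths sum to its count
lemma pvRunScan_D5 : ∀ (n : Nat) (l : List String), l.length ≤ n → ∀ (a b c d e : Int),
    pvRunScan (pvD5 a b c d e) l =
      pvD5 (a + l.count "new") (b + l.count "recurring") (c + l.count "rejected")
        (d + l.count "deferred") (e + l.count "deferred_resurfaced") := by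
  intro n
  induction n with
  | zero =>
    intro l hl a b c d e
    have : l = [] := List.eq_nil_of_length_eq_zero (Nat.le_zero.mp hl)
    subst this; simp [pvRunScan]
  | succ n ih =>
    intro l hl a b c d e
    match l with
    | [] => simp [pvRunScan]
    | st :: rest =>
      have htake : ∀ x ∈ rest.takeWhile (· == st), x = st := by
        intro x hx
        simpa using List.mem_takeWhile_imp hx
      have hdlen : (rest.dropWhile (· == st)).length ≤ n := by
        have h1 := List.length_dropWhile_le (· == st) rest
        simp only [List.length_cons] at hl
        omega
      have hcount : ∀ k : String, (st :: rest).count k =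
          ((st :: rest.takeWhile (· == st)).count k) + (rest.dropWhile (· == st)).count k := by
        intro k
        conv_lhs => rw [show st :: rest =
          (st :: rest.takeWhile (· == st)) ++ rest.dropWhile (· == st) by
            simp [List.takeWhile_append_dropWhile]]
        rw [List.count_append]
      have hruncount : ∀ k : String, (st :: rest.takeWhile (· == st)).count k =
          if k = st then 1 + (rest.takeWhile (· == st)).length else 0 := by
        intro k
        by_cases hk : k = st
        · subst hk
          rw [List.count_cons_self, if_pos rfl]
          have ht : (rest.takeWhile (· == k)).count k = (rest.takeWhile (· == k)).length :=
            List.count_eq_length.mpr (fun x hx => by simpa using (htake x hx).symm)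
          omega
        · rw [if_neg hk, List.count_cons_of_ne (fun h => hk h.symm), List.count_eq_zero]
          intro hmem
          exact hk (htake k hmem)
      rw [pvRunScan]
      simp only [pvBump_D5 a b c d e (1 + ((rest.takeWhile (· == st)).length : Int)) st]
      by_cases h1 : st = "new"
      · subst h1; rw [if_pos rfl, ih _ hdlen]
        apply pvD5_congr
        · rw [hcount, hruncount, if_pos rfl]; push_cast; ring
        · rw [hcount, hruncount, if_neg (by decide), Nat.zero_add]
        · rw [hcount, hruncount, if_neg (by decide), Nat.zero_add]
        · rw [hcount, hruncount, if_neg (by decide), Nat.zero_add]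
        · rw [hcount, hruncount, if_neg (by decide), Nat.zero_add]
      rw [if_neg h1]
      by_cases h2 : st = "recurring"
      · subst h2; rw [if_pos rfl, ih _ hdlen]
        apply pvD5_congr
        · rw [hcount, hruncount, if_neg (by decide), Nat.zero_add]
        · rw [hcount, hruncount, if_pos rfl]; push_cast; ring
        · rw [hcount, hruncount, if_neg (by decide), Nat.zero_add]
        · rw [hcount, hruncount, if_neg (by decide), Nat.zero_add]
        · rw [hcount, hruncount, if_neg (by decide), Nat.zero_add]
      rw [if_neg h2]
      by_cases h3 : st = "rejected"
      · subst h3; rw [if_pos rfl, ih _ hdlen]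
        apply pvD5_congr
        · rw [hcount, hruncount, if_neg (by decide), Nat.zero_add]
        · rw [hcount, hruncount, if_neg (by decide), Nat.zero_add]
        · rw [hcount, hruncount, if_pos rfl]; push_cast; ring
        · rw [hcount, hruncount, if_neg (by decide), Nat.zero_add]
        · rw [hcount, hruncount, if_neg (by decide), Nat.zero_add]
      rw [if_neg h3]
      by_cases h4 : st = "deferred"
      · subst h4; rw [if_pos rfl, ih _ hdlen]
        apply pvD5_congr
        · rw [hcount, hruncount, if_neg (by decide), Nat.zero_add]
        · rw [hcount, hruncount, if_neg (by decide), Nat.zero_add]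
        · rw [hcount, hruncount, if_neg (by decide), Nat.zero_add]
        · rw [hcount, hruncount, if_pos rfl]; push_cast; ring
        · rw [hcount, hruncount, if_neg (by decide), Nat.zero_add]
      rw [if_neg h4]
      by_cases h5 : st = "deferred_resurfaced"
      · subst h5; rw [if_pos rfl, ih _ hdlen]
        apply pvD5_congr
        · rw [hcount, hruncount, if_neg (by decide), Nat.zero_add]
        · rw [hcount, hruncount, if_neg (by decide), Nat.zero_add]
        · rw [hcount, hruncount, if_neg (by decide), Nat.zero_add]
        · rw [hcount, hruncount, if_neg (by decide), Nat.zero_add]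
        · rw [hcount, hruncount, if_pos rfl]; push_cast; ring
      rw [if_neg h5, ih _ hdlen]
      apply pvD5_congr
      · rw [hcount, hruncount, if_neg (fun h => h1 h.symm), Nat.zero_add]
      · rw [hcount, hruncount, if_neg (fun h => h2 h.symm), Nat.zero_add]
      · rw [hcount, hruncount, if_neg (fun h => h3 h.symm), Nat.zero_add]
      · rw [hcount, hruncount, if_neg (fun h => h4 h.symm), Nat.zero_add]
      · rw [hcount, hruncount, if_neg (fun h => h5 h.symm), Nat.zero_add]

-- A's two loops, merged over the concatenated status list
lemma pvA_eq (active suppressed : List (List (String × String))) (dr : Int) :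
    compute_lifecycle_summary active suppressed dr =
      (pvD5 (((active.map (fun f => (List.lookup "lifecycle_status" f).getD "new") ++
               suppressed.map (fun f => (List.lookup "lifecycle_status" f).getD "rejected")).count "new" : Int))
            (((active.map (fun f => (List.lookup "lifecycle_status" f).getD "new") ++
               suppressed.map (fun f => (List.lookup "lifecycle_status" f).getD "rejected")).count "recurring" : Int))
            (((active.map (fun f => (List.lookup "lifecycle_status" f).getD "new") ++
               suppressed.map (fun f => (List.lookup "lifecycle_status" f).getD "rejected")).count "rejected" : Int))
            (((active.map (fun f => (List.lookup "lifecycle_status" f).getD "new") ++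
               suppressed.map (fun f => (List.lookup "lifecycle_status" f).getD "rejected")).count "deferred" : Int))
            (dr + ((active.map (fun f => (List.lookup "lifecycle_status" f).getD "new") ++
               suppressed.map (fun f => (List.lookup "lifecycle_status" f).getD "rejected")).count "deferred_resurfaced"))).items := by
  have h : ∀ (l : List (List (String × String))) (dflt : String) (init : PySem.Dict String Int),
      l.foldl (fun s f =>
        if s.contains ((List.lookup "lifecycle_status" f).getD dflt) then
          s.modify ((List.lookup "lifecycle_status" f).getD dflt) 0 (· + 1) else s) init =
        (l.map (fun f => (List.lookup "lifecycle_status" f).getD dflt)).foldl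
          (fun s st => if s.contains st then s.modify st 0 (· + 1) else s) init := by
    intro l dflt init
    induction l generalizing init with
    | nil => rfl
    | cons x xs ihx => simp only [List.foldl_cons, List.map_cons]; rw [ihx]
  show ((suppressed.foldl (fun s f =>
          if s.contains ((List.lookup "lifecycle_status" f).getD "rejected") then
            s.modify ((List.lookup "lifecycle_status" f).getD "rejected") 0 (· + 1) else s)
          (active.foldl (fun s f =>
            if s.contains ((List.lookup "lifecycle_status" f).getD "new") then
              s.modify ((List.lookup "lifecycle_status" f).getD "new") 0 (· + 1) else s)
            (pvD5 0 0 0 0 dr))).items) = _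
  rw [h, h, ← List.foldl_append, pvLoop_D5]
  simp

-- ===== VERDICT (by name: the statement is the Claim_ definition above) =====
theorem compute_lifecycle_summary_spec : Claim_equal_compute_lifecycle_summary := by
  intro active suppressed dr _
  show _ = _
  rw [pvA_eq]
  have hB : compute_lifecycle_summary_alt active suppressed dr =
      (pvRunScan (pvD5 0 0 0 0 dr)
        (PySem.List.sorted
          (active.map (fun f => (List.lookup "lifecycle_status" f).getD "new") ++
           suppressed.map (fun f => (List.lookup "lifecycle_status" f).getD "rejected"))
          (fun x => x) false)).items := rfl
  rw [hB, pvRunScan_D5 (PySem.List.sorted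
      (active.map (fun f => (List.lookup "lifecycle_status" f).getD "new") ++
       suppressed.map (fun f => (List.lookup "lifecycle_status" f).getD "rejected"))
      (fun x => x) false).length _ le_rfl]
  have hperm := PySem.List.sorted_perm
    (active.map (fun f => (List.lookup "lifecycle_status" f).getD "new") ++
     suppressed.map (fun f => (List.lookup "lifecycle_status" f).getD "rejected"))
    (fun x : String => x) false
  simp [hperm.count_eq]
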